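-- pv_equiv track=rewrite | github.com/rickabruzzo/HNY-Battleship | game.py | check_sunk
-- ===== SOURCE A (Python) =====
-- SHIP  = 1
--
-- HIT   = 2
--
-- SHIP_SIZES  = [5, 4, 3, 3, 2]
--
-- SHIP_NAMES  = ["Carrier", "Battleship", "Cruiser", "Submarine", "Destroyer"]
--
-- BOARD_SIZE = 10
--
-- def check_sunk(board, r, c):
--     """
--     After a hit at (r,c), check if a complete ship was just sunk.
--     Scans horizontal then vertical runs of HITs from (r,c).
--     Returns (size, name) if sunk, or (0, "") if not.
--     """
--     for horiz in (True, False):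
--         run_len = 1
--         # extend in negative direction
--         i = 1
--         end_neg_ok = True
--         while True:
--             nr = r if horiz else r - i
--             nc = c - i if horiz else c
--             if 0 <= nr < BOARD_SIZE and 0 <= nc < BOARD_SIZE:
--                 if board[nr * BOARD_SIZE + nc] == HIT:
--                     run_len += 1
--                     i += 1
--                     continue
--                 elif board[nr * BOARD_SIZE + nc] == SHIP:
--                     end_neg_ok = False  # ship continues — not sunk
--             break
--         if not end_neg_ok:
--             continue
--         # extend in positive direction
--         i = 1
--         end_pos_ok = True
--         while True:
--             nr = r if horiz else r + i
--             nc = c + i if horiz else c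
--             if 0 <= nr < BOARD_SIZE and 0 <= nc < BOARD_SIZE:
--                 if board[nr * BOARD_SIZE + nc] == HIT:
--                     run_len += 1
--                     i += 1
--                     continue
--                 elif board[nr * BOARD_SIZE + nc] == SHIP:
--                     end_pos_ok = False
--             break
--         if not end_pos_ok:
--             continue
--         if run_len > 1:
--             # Match run length to a ship name
--             for idx in range(len(SHIP_SIZES)):
--                 if SHIP_SIZES[idx] == run_len:
--                     return run_len, SHIP_NAMES[idx]
--     return 0, ""
-- ===== SOURCE B (Python) =====
-- SHIP = 1
-- HIT = 2
-- SHIP_SIZES = [5, 4, 3, 3, 2]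
-- SHIP_NAMES = ["Carrier", "Battleship", "Cruiser", "Submarine", "Destroyer"]
-- BOARD_SIZE = 10
--
-- # size -> name of the first ship of that size (3 -> "Cruiser", the first size-3 entry)
-- NAME_BY_SIZE = {5: "Carrier", 4: "Battleship", 3: "Cruiser", 2: "Destroyer"}
--
-- def check_sunk(board, r, c):
--     if not (0 <= r < BOARD_SIZE and 0 <= c < BOARD_SIZE):
--         return 0, ""
--     row = [board[r * BOARD_SIZE + j] for j in range(BOARD_SIZE)]
--     col = [board[i * BOARD_SIZE + c] for i in range(BOARD_SIZE)]
--     for line, k in ((row, c), (col, r)):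
--         # left[j] = #consecutive HITs immediately left of j, right[j] = same to the right,
--         # each filled by one linear scan carrying a running counter.
--         left = []
--         run = 0
--         for x in line:
--             left.append(run)
--             run = run + 1 if x == HIT else 0
--         right = []
--         run = 0
--         for x in reversed(line):
--             right.append(run)
--             run = run + 1 if x == HIT else 0
--         right.reverse()
--         lo = k - left[k]
--         hi = k + right[k]
--         # blocked: the cell just past either end of the run is an unhit SHIP cell
--         if lo > 0 and line[lo - 1] == SHIP:
--             continue
--         if hi < BOARD_SIZE - 1 and line[hi + 1] == SHIP:
--             continue
--         n = hi - lo + 1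
--         if n in NAME_BY_SIZE:
--             return n, NAME_BY_SIZE[n]
--     return 0, ""
-- ===== Notes on version B (the rewrite author's own statement) =====
-- stated objective: alternative
-- what changed: B precomputes, by one forward and one backward linear scan with a running counter, tables left[j]/right[j] of consecutive-HIT run lengths adjacent to each cell, then reads the run bounds and the two blocking neighbours off the tables in O(1) and looks the run length up in a size->name dict; A instead runs four fused directional while-loops over the flat board carrying run counters and ok-flags.
import Mathlib
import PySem

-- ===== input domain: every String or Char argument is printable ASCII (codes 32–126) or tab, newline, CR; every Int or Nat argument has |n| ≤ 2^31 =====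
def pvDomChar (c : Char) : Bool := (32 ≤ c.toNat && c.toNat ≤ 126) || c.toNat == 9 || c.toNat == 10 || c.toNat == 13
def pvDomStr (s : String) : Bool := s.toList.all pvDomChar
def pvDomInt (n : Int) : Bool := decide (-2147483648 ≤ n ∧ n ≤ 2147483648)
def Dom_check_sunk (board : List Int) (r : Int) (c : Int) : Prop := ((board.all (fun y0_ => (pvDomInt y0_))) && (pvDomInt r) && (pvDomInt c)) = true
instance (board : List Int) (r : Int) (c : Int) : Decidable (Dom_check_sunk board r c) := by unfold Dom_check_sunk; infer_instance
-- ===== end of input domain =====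

-- B replaces A's four fused directional while-loops by precomputed run-length tables:
-- one forward and one backward linear scan fill left[j]/right[j] (consecutive HITs next to
-- each cell), then run bounds, blocking neighbours and a dict lookup are read off in O(1).

-- board[i] (total form; under Pre_ every index both programs use is in range, so exact)
def pvAt (board : List Int) (i : Int) : Int := PySem.List.pyGetD board i 0

-- ===== PORT A =====
-- the 'extend in negative direction' while loop: state (i, run_len); fuel 11 bounds the ≤ 10 grid steps
def csA_negScan (board : List Int) (r : Int) (c : Int) (horiz : Bool) :
    Nat → Int → Int → Int × Bool
  | 0, _, run => (run, true)
  | fuel+1, i, run =>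
    let nr := if horiz then r else r - i
    let nc := if horiz then c - i else c
    if 0 ≤ nr ∧ nr < 10 ∧ 0 ≤ nc ∧ nc < 10 then
      if pvAt board (nr * 10 + nc) == 2 then csA_negScan board r c horiz fuel (i+1) (run+1)
      else if pvAt board (nr * 10 + nc) == 1 then (run, false)
      else (run, true)
    else (run, true)

-- the 'extend in positive direction' while loop
def csA_posScan (board : List Int) (r : Int) (c : Int) (horiz : Bool) :
    Nat → Int → Int → Int × Bool
  | 0, _, run => (run, true)
  | fuel+1, i, run =>
    let nr := if horiz then r else r + i
    let nc := if horiz then c + i else c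
    if 0 ≤ nr ∧ nr < 10 ∧ 0 ≤ nc ∧ nc < 10 then
      if pvAt board (nr * 10 + nc) == 2 then csA_posScan board r c horiz fuel (i+1) (run+1)
      else if pvAt board (nr * 10 + nc) == 1 then (run, false)
      else (run, true)
    else (run, true)

-- 'for idx in range(len(SHIP_SIZES)): if SHIP_SIZES[idx] == run_len: return run_len, SHIP_NAMES[idx]'
def csA_match (run : Int) : List Int → Option (Int × String)
  | [] => none
  | idx :: rest =>
    if pvAt [5, 4, 3, 3, 2] idx == run then
      some (run, PySem.List.pyGetD ["Carrier", "Battleship", "Cruiser", "Submarine", "Destroyer"] idx "")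
    else csA_match run rest

-- one iteration of 'for horiz in (True, False)'; none = 'continue'
def csA_orient (board : List Int) (r : Int) (c : Int) (horiz : Bool) : Option (Int × String) :=
  let p := csA_negScan board r c horiz 11 1 1
  if p.2 then
    let q := csA_posScan board r c horiz 11 1 p.1
    if q.2 then
      if q.1 > 1 then csA_match q.1 (PySem.List.pyRange 0 5 1) else none
    else none
  else none

def check_sunk (board : List Int) (r : Int) (c : Int) : Int × String :=
  match csA_orient board r c true with
  | some v => v
  | none =>
    match csA_orient board r c false with
    | some v => v
    | none => (0, "")

-- ===== PORT B =====
-- 'NAME_BY_SIZE = {5: "Carrier", 4: "Battleship", 3: "Cruiser", 2: "Destroyer"}'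
def csB_names : PySem.Dict Int String :=
  PySem.Dict.mk [(5, "Carrier"), (4, "Battleship"), (3, "Cruiser"), (2, "Destroyer")]

-- 'left = []; run = 0; for x in line: left.append(run); run = run + 1 if x == HIT else 0'
def csB_scan : List Int → Int → List Int
  | [], _ => []
  | x :: xs, run => run :: csB_scan xs (if x == 2 then run + 1 else 0)

-- one iteration of 'for line, k in ((row, c), (col, r))'; none = 'continue'
def csB_try (line : List Int) (k : Int) : Option (Int × String) :=
  let left := csB_scan line 0
  let right := (csB_scan line.reverse 0).reverse
  let lo := k - pvAt left k
  let hi := k + pvAt right k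
  if lo > 0 ∧ pvAt line (lo - 1) == 1 then none
  else if hi < 9 ∧ pvAt line (hi + 1) == 1 then none
  else
    let n := hi - lo + 1
    match csB_names.get? n with
    | some name => some (n, name)
    | none => none

def check_sunk_alt (board : List Int) (r : Int) (c : Int) : Int × String :=
  if 0 ≤ r ∧ r < 10 ∧ 0 ≤ c ∧ c < 10 then
    let row := (PySem.List.pyRange 0 10 1).map (fun j => pvAt board (r * 10 + j))
    let col := (PySem.List.pyRange 0 10 1).map (fun i => pvAt board (i * 10 + c))
    match csB_try row c with
    | some v => v
    | none =>
      match csB_try col r with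
      | some v => v
      | none => (0, "")
  else (0, "")

-- ===== PRECONDITION & SPEC =====
-- Pre_ covers the game's natural domain (a board holding all 100 cells, in-grid hit cell)
-- plus the inputs whose coordinates are so far off-grid that A touches no cell and returns
-- (0, ""). Excluded: boards shorter than 100 cells (A raises IndexError on most in-grid hits
-- and B, which indexes full row/column lines, raises there; where A happens to return,
-- its value depends on how much of the board exists) and the off-by-one off-grid coordinates
-- (r or c equal to -1 or 10), where A's value comes from probing cells adjacent to a hit
-- that is not on the board.
def Pre_check_sunk (board : List Int) (r : Int) (c : Int) : Prop :=
  (100 ≤ board.length ∧ 0 ≤ r ∧ r < 10 ∧ 0 ≤ c ∧ c < 10) ∨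
  (((r < 0 ∨ 10 ≤ r) ∨ (c < -1 ∨ 10 < c)) ∧ ((c < 0 ∨ 10 ≤ c) ∨ (r < -1 ∨ 10 < r)))
instance (board : List Int) (r : Int) (c : Int) : Decidable (Pre_check_sunk board r c) := by
  unfold Pre_check_sunk; infer_instance

def pvWitness_check_sunk : List Int × Int × Int := (List.replicate 100 0, 2, 3)

def Spec_check_sunk (board : List Int) (r : Int) (c : Int) (out : Int × String) : Prop := out = check_sunk_alt board r c
instance (board : List Int) (r : Int) (c : Int) (out : Int × String) : Decidable (Spec_check_sunk board r c out) := by unfold Spec_check_sunk; infer_instance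

-- ===== CLAIM (what is proved, stated in full; the proofs are below) =====
def Claim_equal_check_sunk : Prop := ∀ (board : List Int) (r : Int) (c : Int), Dom_check_sunk board r c → Pre_check_sunk board r c → Spec_check_sunk board r c (check_sunk board r c)

-- ===== LEMMAS AND PROOFS =====

-- proof-side characterisation of the run bounds: lo/hi pointer values
def csB_lo (line : List Int) : Nat → Nat
  | 0 => 0
  | m+1 => if pvAt line (m : Int) == 2 then csB_lo line m else m + 1

def csB_hi (line : List Int) (m : Nat) : Nat :=
  if m < 9 then
    (if pvAt line ((m : Int) + 1) == 2 then csB_hi line (m+1) else m)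
  else m
termination_by 9 - m

-- the materialized line of an orientation: row r (horiz) or column c (vertical)
def lineOf (board : List Int) (r : Int) (c : Int) (horiz : Bool) : List Int :=
  (PySem.List.pyRange 0 10 1).map (fun j => pvAt board (if horiz then r * 10 + j else j * 10 + c))

-- B's two neighbour checks, as the Bool ok-flags A's scans produce
def negOk (line : List Int) (k : Nat) : Bool :=
  !(decide (0 < csB_lo line k) && (pvAt line ((csB_lo line k : Int) - 1) == 1))
def posOk (line : List Int) (k : Nat) : Bool :=
  !(decide (csB_hi line k < 9) && (pvAt line ((csB_hi line k : Int) + 1) == 1))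

theorem pvAt_lineOf (board : List Int) (r c : Int) (horiz : Bool) (j : Int)
    (h0 : 0 ≤ j) (h10 : j < 10) :
    pvAt (lineOf board r c horiz) j = pvAt board (if horiz then r * 10 + j else j * 10 + c) := by
  unfold pvAt lineOf
  rw [PySem.List.pyGetD_map_pyRange_of_nonneg _ _ _ _ h0 (by omega)]
  rfl

theorem length_lineOf (board : List Int) (r c : Int) (horiz : Bool) :
    (lineOf board r c horiz).length = 10 := by
  unfold lineOf
  rw [List.length_map, PySem.List.length_pyRange_one]
  rfl

theorem bounds_neg (r c i : Int) (horiz : Bool)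
    (hfix : 0 ≤ (if horiz then r else c) ∧ (if horiz then r else c) < 10) :
    ((0 ≤ (if horiz then r else r - i)) ∧ (if horiz then r else r - i) < 10 ∧
      (0 ≤ (if horiz then c - i else c)) ∧ (if horiz then c - i else c) < 10)
      ↔ (0 ≤ (if horiz then c else r) - i ∧ (if horiz then c else r) - i < 10) := by
  cases horiz <;> simp_all

theorem idx_neg (r c i : Int) (horiz : Bool) :
    (if horiz then r else r - i) * 10 + (if horiz then c - i else c)
      = (if horiz then r * 10 + ((if horiz then c else r) - i)
         else ((if horiz then c else r) - i) * 10 + c) := by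
  cases horiz <;> simp

theorem bounds_pos (r c i : Int) (horiz : Bool)
    (hfix : 0 ≤ (if horiz then r else c) ∧ (if horiz then r else c) < 10) :
    ((0 ≤ (if horiz then r else r + i)) ∧ (if horiz then r else r + i) < 10 ∧
      (0 ≤ (if horiz then c + i else c)) ∧ (if horiz then c + i else c) < 10)
      ↔ (0 ≤ (if horiz then c else r) + i ∧ (if horiz then c else r) + i < 10) := by
  cases horiz <;> simp_all

theorem idx_pos (r c i : Int) (horiz : Bool) :
    (if horiz then r else r + i) * 10 + (if horiz then c + i else c)
      = (if horiz then r * 10 + ((if horiz then c else r) + i)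
         else ((if horiz then c else r) + i) * 10 + c) := by
  cases horiz <;> simp

theorem negScan_eq (board : List Int) (r c : Int) (horiz : Bool)
    (hfix : 0 ≤ (if horiz then r else c) ∧ (if horiz then r else c) < 10) :
    ∀ (m fuel : Nat) (i run : Int), m ≤ 9 → m + 1 ≤ fuel →
      (if horiz then c else r) - i = (m : Int) - 1 →
      csA_negScan board r c horiz fuel i run
        = (run + ((m : Int) - (csB_lo (lineOf board r c horiz) m : Int)),
           negOk (lineOf board r c horiz) m) := by
  intro m
  induction m with
  | zero =>
    intro fuel i run _ hf hidx
    obtain ⟨f, rfl⟩ : ∃ f, fuel = f + 1 := ⟨fuel - 1, by omega⟩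
    simp only [csA_negScan]
    rw [if_congr (bounds_neg r c i horiz hfix) rfl rfl, if_neg (by omega)]
    simp [csB_lo, negOk]
  | succ m ih =>
    intro fuel i run hm hf hidx
    obtain ⟨f, rfl⟩ : ∃ f, fuel = f + 1 := ⟨fuel - 1, by omega⟩
    have hj : (if horiz then c else r) - i = (m : Int) := by push_cast at hidx; omega
    simp only [csA_negScan]
    rw [if_congr (bounds_neg r c i horiz hfix) rfl rfl, if_pos (by omega)]
    rw [idx_neg, hj, ← pvAt_lineOf board r c horiz (m : Int) (by positivity) (by omega)]
    by_cases h2 : (pvAt (lineOf board r c horiz) (m : Int) == 2) = true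
    · rw [if_pos h2]
      rw [ih f (i + 1) (run + 1) (by omega) (by omega) (by omega)]
      have hlo : csB_lo (lineOf board r c horiz) (m + 1) = csB_lo (lineOf board r c horiz) m := by
        simp [csB_lo, h2]
      rw [hlo]
      unfold negOk
      rw [hlo, Prod.mk.injEq]
      exact ⟨by push_cast; ring, rfl⟩
    · rw [if_neg h2]
      have hlo : csB_lo (lineOf board r c horiz) (m + 1) = m + 1 := by
        simp only [csB_lo, h2]
        simp
      by_cases h1 : (pvAt (lineOf board r c horiz) (m : Int) == 1) = true
      · rw [if_pos h1]
        unfold negOk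
        rw [hlo]
        simp [h1]
      · rw [if_neg h1]
        unfold negOk
        rw [hlo]
        simp [h1]

theorem posScan_eq (board : List Int) (r c : Int) (horiz : Bool)
    (hfix : 0 ≤ (if horiz then r else c) ∧ (if horiz then r else c) < 10) :
    ∀ (t m fuel : Nat) (i run : Int), m ≤ 9 → 9 - m ≤ t → t + 1 ≤ fuel →
      (if horiz then c else r) + i = (m : Int) + 1 →
      csA_posScan board r c horiz fuel i run
        = (run + ((csB_hi (lineOf board r c horiz) m : Int) - (m : Int)),
           posOk (lineOf board r c horiz) m) := by
  intro t
  induction t with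
  | zero =>
    intro m fuel i run hm ht hf hidx
    have hm9 : m = 9 := by omega
    subst hm9
    obtain ⟨f, rfl⟩ : ∃ f, fuel = f + 1 := ⟨fuel - 1, by omega⟩
    simp only [csA_posScan]
    rw [if_congr (bounds_pos r c i horiz hfix) rfl rfl, if_neg (by push_cast at hidx; omega)]
    have hhi : csB_hi (lineOf board r c horiz) 9 = 9 := by
      rw [csB_hi]; simp
    simp [hhi, posOk]
  | succ t ih =>
    intro m fuel i run hm ht hf hidx
    by_cases hm9 : m = 9
    · subst hm9
      obtain ⟨f, rfl⟩ : ∃ f, fuel = f + 1 := ⟨fuel - 1, by omega⟩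
      simp only [csA_posScan]
      rw [if_congr (bounds_pos r c i horiz hfix) rfl rfl, if_neg (by push_cast at hidx; omega)]
      have hhi : csB_hi (lineOf board r c horiz) 9 = 9 := by
        rw [csB_hi]; simp
      simp [hhi, posOk]
    · obtain ⟨f, rfl⟩ : ∃ f, fuel = f + 1 := ⟨fuel - 1, by omega⟩
      have hj : (if horiz then c else r) + i = (m : Int) + 1 := hidx
      simp only [csA_posScan]
      rw [if_congr (bounds_pos r c i horiz hfix) rfl rfl, if_pos (by omega)]
      rw [idx_pos, hj, ← pvAt_lineOf board r c horiz ((m : Int) + 1) (by positivity) (by omega)]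
      by_cases h2 : (pvAt (lineOf board r c horiz) ((m : Int) + 1) == 2) = true
      · rw [if_pos h2]
        rw [ih (m + 1) f (i + 1) (run + 1) (by omega) (by omega) (by omega) (by omega)]
        have hhi : csB_hi (lineOf board r c horiz) m = csB_hi (lineOf board r c horiz) (m + 1) := by
          rw [csB_hi]
          rw [if_pos (by omega)]
          rw [if_pos h2]
        rw [← hhi]
        unfold posOk
        rw [← hhi, Prod.mk.injEq]
        exact ⟨by push_cast; ring, rfl⟩
      · rw [if_neg h2]
        have hhi : csB_hi (lineOf board r c horiz) m = m := by
          rw [csB_hi]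
          rw [if_pos (by omega)]
          rw [if_neg h2]
        by_cases h1 : (pvAt (lineOf board r c horiz) ((m : Int) + 1) == 1) = true
        · rw [if_pos h1]
          unfold posOk
          rw [hhi]
          simp [h1]
          omega
        · rw [if_neg h1]
          unfold posOk
          rw [hhi]
          simp [h1]

-- pvAt through cons at a successor index
theorem pvAt_cons_succ (x : Int) (xs : List Int) (m : Nat) :
    pvAt (x :: xs) ((m : Int) + 1) = pvAt xs (m : Int) := by
  unfold pvAt
  have h1 : ((m : Int) + 1) = ((m + 1 : Nat) : Int) := by push_cast; ring
  rw [h1, PySem.List.pyGetD_natCast, PySem.List.pyGetD_natCast]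
  rfl

-- csB_lo through cons: the run ending just before position m+1 of (x :: xs)
theorem csB_lo_step (L : List Int) (m : Nat) :
    csB_lo L (m + 1) = if pvAt L (m : Int) == 2 then csB_lo L m else m + 1 := rfl

theorem csB_lo_cons (x : Int) (xs : List Int) (m : Nat) :
    csB_lo (x :: xs) (m + 1)
      = if csB_lo xs m = 0 then (if x == 2 then 0 else 1) else csB_lo xs m + 1 := by
  induction m with
  | zero =>
    have h0 : pvAt (x :: xs) ((0 : Nat) : Int) = x := by
      unfold pvAt; rw [PySem.List.pyGetD_natCast]; rfl
    rw [csB_lo_step, h0]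
    by_cases hx : (x == 2) = true <;> simp [hx, csB_lo]
  | succ m ih =>
    rw [csB_lo_step (x :: xs) (m + 1)]
    have hc : ((m + 1 : Nat) : Int) = (m : Int) + 1 := by push_cast; ring
    rw [hc, pvAt_cons_succ, csB_lo_step xs m]
    by_cases h2 : (pvAt xs (m : Int) == 2) = true
    · rw [if_pos h2, ih, if_pos h2]
    · rw [if_neg h2, if_neg h2]
      simp

-- the scan table's value: table[m] = initial run (if the HIT run reaches index 0) + run length before m
theorem csB_scan_get (L : List Int) :
    ∀ (run : Int) (m : Nat), m < L.length →
      pvAt (csB_scan L run) (m : Int)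
        = (if csB_lo L m = 0 then run else 0) + ((m : Int) - (csB_lo L m : Int)) := by
  induction L with
  | nil => intro run m h; simp at h
  | cons x xs ih =>
    intro run m hm
    cases m with
    | zero =>
      simp only [csB_scan, csB_lo]
      unfold pvAt
      rw [PySem.List.pyGetD_natCast]
      simp
    | succ m =>
      have hLHS : pvAt (csB_scan (x :: xs) run) ((m + 1 : Nat) : Int)
          = pvAt (csB_scan xs (if x == 2 then run + 1 else 0)) (m : Int) := by
        simp only [csB_scan]
        have : ((m + 1 : Nat) : Int) = (m : Int) + 1 := by push_cast; ring
        rw [this, pvAt_cons_succ]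
      rw [hLHS, ih _ m (by simpa using hm), csB_lo_cons]
      by_cases h0 : csB_lo xs m = 0
      · by_cases hx : (x == 2) = true
        · simp only [h0, hx, if_true]
          push_cast; ring
        · simp only [h0, hx, if_false, Bool.false_eq_true]
          push_cast; ring
      · have h1 : csB_lo xs m + 1 ≠ 0 := by omega
        simp only [if_neg h0, if_neg h1]
        push_cast
        ring

-- pvAt on the reverse of a length-10 list
theorem pvAt_reverse10 (L : List Int) (hL : L.length = 10) (j : Nat) (hj : j ≤ 9) :
    pvAt L.reverse ((j : Int)) = pvAt L (((9 - j : Nat) : Int)) := by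
  unfold pvAt
  rw [PySem.List.pyGetD_natCast, PySem.List.pyGetD_natCast]
  have h1 : j < L.reverse.length := by rw [List.length_reverse, hL]; omega
  have h2 : 9 - j < L.length := by omega
  rw [List.getD_eq_getElem _ _ h1, List.getD_eq_getElem _ _ h2]
  rw [List.getElem_reverse]
  congr 1
  omega

-- the backward scan's pointer is the forward scan's pointer on the reversed line
theorem csB_lo_reverse (L : List Int) (hL : L.length = 10) :
    ∀ (t m : Nat), m ≤ 9 → 9 - m ≤ t → csB_lo L.reverse (9 - m) = 9 - csB_hi L m := by
  intro t
  induction t with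
  | zero =>
    intro m hm ht
    have : m = 9 := by omega
    subst this
    have hhi : csB_hi L 9 = 9 := by rw [csB_hi]; simp
    simp [csB_lo, hhi]
  | succ t ih =>
    intro m hm ht
    by_cases hm9 : m = 9
    · subst hm9
      have hhi : csB_hi L 9 = 9 := by rw [csB_hi]; simp
      simp [csB_lo, hhi]
    · have hstep : 9 - m = (9 - (m + 1)) + 1 := by omega
      rw [hstep]
      have hget : pvAt L.reverse ((( 9 - (m + 1) : Nat)) : Int) = pvAt L (((m + 1 : Nat)) : Int) := by
        rw [pvAt_reverse10 L hL (9 - (m + 1)) (by omega)]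
        congr 2
        omega
      have hcast : ((m + 1 : Nat) : Int) = (m : Int) + 1 := by push_cast; ring
      simp only [csB_lo]
      rw [hget, hcast]
      by_cases h2 : (pvAt L ((m : Int) + 1) == 2) = true
      · rw [if_pos h2, ih (m + 1) (by omega) (by omega)]
        have hhi : csB_hi L m = csB_hi L (m + 1) := by
          rw [csB_hi, if_pos (by omega), if_pos h2]
        rw [hhi]
      · rw [if_neg h2]
        have hhi : csB_hi L m = m := by
          rw [csB_hi, if_pos (by omega), if_neg h2]
        rw [hhi]
        omega

theorem length_csB_scan (L : List Int) : ∀ run, (csB_scan L run).length = L.length := by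
  induction L with
  | nil => intro run; rfl
  | cons x xs ih => intro run; simp [csB_scan, ih]

-- the two table reads, in terms of the lo/hi pointers
theorem csB_hi_bounds (L : List Int) :
    ∀ (t m : Nat), m ≤ 9 → 9 - m ≤ t → m ≤ csB_hi L m ∧ csB_hi L m ≤ 9 := by
  intro t
  induction t with
  | zero =>
    intro m hm ht
    have h9 : m = 9 := by omega
    subst h9
    have : csB_hi L 9 = 9 := by rw [csB_hi]; simp
    omega
  | succ t ih =>
    intro m hm ht
    by_cases h9 : m = 9
    · subst h9
      have : csB_hi L 9 = 9 := by rw [csB_hi]; simp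
      omega
    · rw [csB_hi, if_pos (by omega)]
      split_ifs with h2
      · have := ih (m + 1) (by omega) (by omega)
        omega
      · omega

theorem left_read (L : List Int) (hL : L.length = 10) (k : Nat) (hk : k ≤ 9) :
    pvAt (csB_scan L 0) (k : Int) = (k : Int) - (csB_lo L k : Int) := by
  rw [csB_scan_get L 0 k (by omega)]
  split_ifs <;> ring

theorem right_read (L : List Int) (hL : L.length = 10) (k : Nat) (hk : k ≤ 9) :
    pvAt ((csB_scan L.reverse 0).reverse) (k : Int) = (csB_hi L k : Int) - (k : Int) := by
  have hlen : ((csB_scan L.reverse 0)).length = 10 := by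
    rw [length_csB_scan]; simp [hL]
  rw [pvAt_reverse10 _ hlen k hk]
  rw [csB_scan_get _ 0 (9 - k) (by rw [List.length_reverse, hL]; omega)]
  have hrev : csB_lo L.reverse (9 - k) = 9 - csB_hi L k := csB_lo_reverse L hL (9 - k) k hk (by omega)
  have hb := csB_hi_bounds L 10 k hk (by omega)
  rw [hrev]
  split_ifs with h0 <;> omega

-- the size -> name lookup agrees with A's linear table scan (for every run length)
theorem names_eq (n : Int) :
    (match csB_names.get? n with
      | some name => some (n, name)
      | none => (none : Option (Int × String)))
      = if n > 1 then csA_match n (PySem.List.pyRange 0 5 1) else none := by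
  have h : PySem.List.pyRange 0 5 1 = [0, 1, 2, 3, 4] := by decide
  rw [h]
  by_cases h5 : n = 5
  · subst h5; decide
  by_cases h4 : n = 4
  · subst h4; decide
  by_cases h3 : n = 3
  · subst h3; decide
  by_cases h2 : n = 2
  · subst h2; decide
  have hget : csB_names.get? n = none := by
    unfold csB_names
    rw [PySem.Dict.get?_mk_cons, if_neg (by simpa using (Ne.symm h5))]
    rw [PySem.Dict.get?_mk_cons, if_neg (by simpa using (Ne.symm h4))]
    rw [PySem.Dict.get?_mk_cons, if_neg (by simpa using (Ne.symm h3))]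
    rw [PySem.Dict.get?_mk_cons, if_neg (by simpa using (Ne.symm h2))]
    rfl
  rw [hget]
  have e5 : (5 == n) = false := by simpa using (Ne.symm h5)
  have e4 : (4 == n) = false := by simpa using (Ne.symm h4)
  have e3 : (3 == n) = false := by simpa using (Ne.symm h3)
  have e2 : (2 == n) = false := by simpa using (Ne.symm h2)
  simp only [csA_match, pvAt]
  norm_num [PySem.List.pyGetD]
  have n5 : ¬(5 = n) := fun h => h5 h.symm
  have n4 : ¬(4 = n) := fun h => h4 h.symm
  have n3 : ¬(3 = n) := fun h => h3 h.symm
  have n2 : ¬(2 = n) := fun h => h2 h.symm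
  simp [n5, n4, n3, n2]

theorem orient_eq (board : List Int) (r c : Int) (horiz : Bool)
    (hfix : 0 ≤ (if horiz then r else c) ∧ (if horiz then r else c) < 10)
    (hvar : 0 ≤ (if horiz then c else r) ∧ (if horiz then c else r) < 10) :
    csA_orient board r c horiz = csB_try (lineOf board r c horiz) (if horiz then c else r) := by
  set kI : Int := if horiz then c else r with hkI
  have hkv : ((kI.toNat : Nat) : Int) = kI := Int.toNat_of_nonneg hvar.1
  have hk9 : kI.toNat ≤ 9 := by omega
  have hneg := negScan_eq board r c horiz hfix kI.toNat 11 1 1 hk9 (by omega) (by omega)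
  have hpos := fun run => posScan_eq board r c horiz hfix 10 kI.toNat 11 1 run hk9
    (by omega) (by omega) (by omega)
  set L := lineOf board r c horiz with hL
  have hLlen : L.length = 10 := length_lineOf board r c horiz
  unfold csA_orient csB_try
  simp only [hneg, hpos]
  -- B's table reads
  have hleft : pvAt (csB_scan L 0) kI = (kI.toNat : Int) - (csB_lo L kI.toNat : Int) := by
    rw [← hkv, left_read L hLlen kI.toNat hk9, Int.toNat_natCast]
  have hright : pvAt ((csB_scan L.reverse 0).reverse) kI
      = (csB_hi L kI.toNat : Int) - (kI.toNat : Int) := by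
    rw [← hkv, right_read L hLlen kI.toNat hk9, Int.toNat_natCast]
  rw [hleft, hright]
  have hlo : kI - ((kI.toNat : Int) - (csB_lo L kI.toNat : Int)) = (csB_lo L kI.toNat : Int) := by
    omega
  have hhi : kI + ((csB_hi L kI.toNat : Int) - (kI.toNat : Int)) = (csB_hi L kI.toNat : Int) := by
    omega
  rw [hlo, hhi]
  set lo : Nat := csB_lo L kI.toNat
  set hi : Nat := csB_hi L kI.toNat
  have hlo0 : ((lo : Int) > 0) ↔ (0 < lo) := by omega
  have hhi9 : ((hi : Int) < 9) ↔ (hi < 9) := by omega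
  have hOK1 : negOk L kI.toNat
      = decide ¬((lo : Int) > 0 ∧ (pvAt L ((lo : Int) - 1) == 1) = true) := by
    by_cases hlo' : 0 < lo <;>
      rcases Bool.eq_false_or_eq_true (pvAt L ((lo : Int) - 1) == 1) with hp | hp <;>
      simp [negOk, hlo', hp] <;>
      first
        | exact ⟨hlo', by simpa using hp⟩
        | (left; omega)
        | (right; simpa using hp)
  have hOK2 : posOk L kI.toNat
      = decide ¬((hi : Int) < 9 ∧ (pvAt L ((hi : Int) + 1) == 1) = true) := by
    by_cases hhi' : hi < 9 <;>
      rcases Bool.eq_false_or_eq_true (pvAt L ((hi : Int) + 1) == 1) with hp | hp <;>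
      simp [posOk, hhi', hp] <;>
      first
        | exact ⟨hhi', by simpa using hp⟩
        | (left; omega)
        | (right; simpa using hp)
  by_cases hb1 : (lo : Int) > 0 ∧ (pvAt L ((lo : Int) - 1) == 1) = true
  · have hng : negOk L kI.toNat = false := by rw [hOK1]; exact decide_eq_false (not_not_intro hb1)
    rw [if_pos hb1, hng]
    simp
  · have hng : negOk L kI.toNat = true := by rw [hOK1]; exact decide_eq_true hb1
    rw [if_neg hb1, hng]
    by_cases hb2 : (hi : Int) < 9 ∧ (pvAt L ((hi : Int) + 1) == 1) = true
    · have hpg : posOk L kI.toNat = false := by rw [hOK2]; exact decide_eq_false (not_not_intro hb2)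
      rw [if_pos hb2, hpg]
      simp
    · have hpg : posOk L kI.toNat = true := by rw [hOK2]; exact decide_eq_true hb2
      rw [if_neg hb2, hpg]
      have hrun : 1 + ((kI.toNat : Int) - (lo : Int)) + ((hi : Int) - (kI.toNat : Int))
          = (hi : Int) - (lo : Int) + 1 := by ring
      rw [hrun]
      simpa using (names_eq ((hi : Int) - (lo : Int) + 1)).symm

theorem negScan_stop (board : List Int) (r c i run : Int) (horiz : Bool) (f : Nat)
    (h : ¬((0 ≤ (if horiz then r else r - i)) ∧ (if horiz then r else r - i) < 10 ∧
        (0 ≤ (if horiz then c - i else c)) ∧ (if horiz then c - i else c) < 10)) :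
    csA_negScan board r c horiz (f + 1) i run = (run, true) := by
  simp only [csA_negScan]
  rw [if_neg h]

theorem orient_none (board : List Int) (r c : Int) (horiz : Bool)
    (hn : ¬((0 ≤ (if horiz then r else r - 1)) ∧ (if horiz then r else r - 1) < 10 ∧
        (0 ≤ (if horiz then c - 1 else c)) ∧ (if horiz then c - 1 else c) < 10))
    (hp : ¬((0 ≤ (if horiz then r else r + 1)) ∧ (if horiz then r else r + 1) < 10 ∧
        (0 ≤ (if horiz then c + 1 else c)) ∧ (if horiz then c + 1 else c) < 10)) :
    csA_orient board r c horiz = none := by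
  unfold csA_orient
  rw [negScan_stop board r c 1 1 horiz 10 hn]
  have hpos : csA_posScan board r c horiz 11 1 1 = (1, true) := by
    simp only [csA_posScan]
    rw [if_neg hp]
  simp [hpos]

-- ===== VERDICT (by name: the statement is the Claim_ definition above) =====
theorem check_sunk_spec : Claim_equal_check_sunk := by
  intro board r c _hdom hpre
  show _ = _
  rcases hpre with ⟨_hlen, hr0, hr, hc0, hc⟩ | hno
  · -- the natural game domain: full board, in-grid hit
    unfold check_sunk check_sunk_alt
    rw [if_pos ⟨hr0, hr, hc0, hc⟩]
    have hrow : ((PySem.List.pyRange 0 10 1).map fun j => pvAt board (r * 10 + j))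
        = lineOf board r c true := by simp [lineOf]
    have hcol : ((PySem.List.pyRange 0 10 1).map fun i => pvAt board (i * 10 + c))
        = lineOf board r c false := by simp [lineOf]
    have h1 := orient_eq board r c true (by simpa using ⟨hr0, hr⟩) (by simpa using ⟨hc0, hc⟩)
    have h2 := orient_eq board r c false (by simpa using ⟨hc0, hc⟩) (by simpa using ⟨hr0, hr⟩)
    norm_num at h1 h2
    rw [hrow, hcol, h1, h2]
  · -- coordinates so far off-grid that A's scans touch no cell: both sides give (0, "")
    have hgrid : ¬(0 ≤ r ∧ r < 10 ∧ 0 ≤ c ∧ c < 10) := by omega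
    unfold check_sunk check_sunk_alt
    rw [if_neg hgrid]
    rw [orient_none board r c true (by simp; omega) (by simp; omega),
        orient_none board r c false (by simp; omega) (by simp; omega)]
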